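-- pv_equiv track=rewrite | github.com/ft0893/Tweet-Fact-Checker | filtered_naive_bayes.py | remove_singles
-- ===== SOURCE A (Python) =====
-- def remove_singles(l):
--     once = set()
--     more = set()
--     for w in l:
--         if w not in more:
--             if w in once:
--                 more.add(w)
--                 once.remove(w)
--             else:
--                 once.add(w)
--     return more
-- ===== SOURCE B (Python) =====
-- def remove_singles(l):
--     # An element belongs to the result iff some position is its second occurrence,
--     # i.e. exactly one copy of it appears strictly before that position.
--     return {w for i, w in enumerate(l) if l[:i].count(w) == 1}
-- ===== Notes on version B (the rewrite author's own statement) =====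
-- stated objective: simpler
-- what changed: A's streaming two-set bookkeeping (once/more with element migration) is replaced by a single stateless set comprehension that keeps w exactly when the prefix before it contains one earlier copy (its second occurrence).
import Mathlib
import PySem

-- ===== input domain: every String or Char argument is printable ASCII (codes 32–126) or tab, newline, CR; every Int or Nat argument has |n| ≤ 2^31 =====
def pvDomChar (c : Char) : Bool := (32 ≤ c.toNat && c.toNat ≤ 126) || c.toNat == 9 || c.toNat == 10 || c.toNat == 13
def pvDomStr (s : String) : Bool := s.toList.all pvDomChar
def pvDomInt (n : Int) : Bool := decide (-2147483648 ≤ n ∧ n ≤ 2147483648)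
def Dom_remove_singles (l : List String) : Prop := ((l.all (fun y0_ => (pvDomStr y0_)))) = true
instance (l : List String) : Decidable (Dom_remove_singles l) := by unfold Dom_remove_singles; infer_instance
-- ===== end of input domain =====

-- B replaces A's two-set streaming bookkeeping with one stateless set comprehension
-- (keep w where the prefix before it holds exactly one earlier copy); objective: simpler.

-- ===== PORT A =====
-- one loop step: state is (once, more)
def removeSinglesStep (st : PySem.Set String × PySem.Set String) (w : String) :
    PySem.Set String × PySem.Set String :=
  let (once, more) := st
  if !(PySem.Set.contains more w) then
    if PySem.Set.contains once w then
      -- once.remove(w): the guard just established w ∈ once, so remove? is some; 'none' is unreachable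
      (match PySem.Set.remove? once w with
       | some o => o
       | none => once,
       PySem.Set.add more w)
    else
      (PySem.Set.add once w, more)
  else
    st

def remove_singles (l : List String) : List String :=
  (l.foldl removeSinglesStep (PySem.Set.empty, PySem.Set.empty)).2

-- ===== PORT B =====
def remove_singles_alt (l : List String) : List String :=
  (PySem.List.enumerate l 0).foldl
    (fun s iw =>
      if PySem.List.count (PySem.List.slice l none (some iw.1)) iw.2 == 1 then
        PySem.Set.add s iw.2
      else s)
    PySem.Set.empty

-- ===== PRECONDITION & SPEC =====
def Spec_remove_singles (l : List String) (out : List String) : Prop := out = remove_singles_alt l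
instance (l : List String) (out : List String) : Decidable (Spec_remove_singles l out) := by unfold Spec_remove_singles; infer_instance

-- ===== CLAIM (what is proved, stated in full; the proofs are below) =====
def Claim_equal_remove_singles : Prop := ∀ (l : List String), Dom_remove_singles l → Spec_remove_singles l (remove_singles l)

-- ===== LEMMAS AND PROOFS =====

-- counting in a one-longer prefix
theorem count_append_single (p : List String) (w v : String) :
    (p ++ [w]).count v = p.count v + (if w = v then 1 else 0) := by
  simp [List.count_append, List.count_singleton']

-- The main invariant: after A has consumed prefix p into (once, more), folding A over the
-- rest r yields, in second projection, exactly B's fold over the enumerated rest.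
theorem removeSingles_key (r : List String) : ∀ (p : List String)
    (once more : PySem.Set String),
    (∀ v, v ∈ once ↔ p.count v = 1) →
    (∀ v, v ∈ more ↔ 2 ≤ p.count v) →
    (r.foldl removeSinglesStep (once, more)).2 =
      (PySem.List.enumerate r (p.length : Int)).foldl
        (fun s iw =>
          if PySem.List.count (PySem.List.slice (p ++ r) none (some iw.1)) iw.2 == 1 then
            PySem.Set.add s iw.2
          else s)
        more := by
  induction r with
  | nil => intro p once more _ _; simp [PySem.List.enumerate]
  | cons w r ih =>
    intro p once more h1 h2
    rw [PySem.List.enumerate_cons]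
    simp only [List.foldl_cons]
    have hsl : PySem.List.slice (p ++ w :: r) none (some (p.length : Int)) = p := by
      rw [PySem.List.slice_to (p ++ w :: r) (Int.natCast_nonneg _)]
      simp
    have hlen : (((p ++ [w]).length : Int)) = (p.length : Int) + 1 := by simp
    have happ : (p ++ [w]) ++ r = p ++ w :: r := by simp
    simp only [removeSinglesStep, hsl]
    by_cases hm : 2 ≤ p.count w
    · -- w already in more: A does nothing, B's condition is false
      have hmw : PySem.Set.contains more w = true := (PySem.Set.contains_iff more w).2 ((h2 w).2 hm)
      have hc : (PySem.List.count p w == 1) = false := by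
        simp only [PySem.List.count, beq_eq_false_iff_ne]; omega
      rw [hmw, hc]
      simp only [Bool.not_true, Bool.false_eq_true, if_false]
      have hA : ∀ v, v ∈ once ↔ (p ++ [w]).count v = 1 := by
        intro v
        rw [h1 v, count_append_single]
        by_cases hv : w = v
        · subst hv; simp only [eq_self_iff_true, ne_eq, not_true_eq_false, and_false, or_true, if_true, reduceIte, true_iff, false_iff]; omega
        · simp [hv, Ne.symm hv]
      have hB : ∀ v, v ∈ more ↔ 2 ≤ (p ++ [w]).count v := by
        intro v
        rw [h2 v, count_append_single]
        by_cases hv : w = v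
        · subst hv; simp only [eq_self_iff_true, ne_eq, not_true_eq_false, and_false, or_true, if_true, reduceIte, true_iff, false_iff]; omega
        · simp [hv, Ne.symm hv]
      have := ih (p ++ [w]) once more hA hB
      rw [happ, hlen] at this
      exact this
    · by_cases ho : p.count w = 1
      · -- second occurrence: A moves w from once to more, B adds w
        have hmw : PySem.Set.contains more w = false := by
          rw [Bool.eq_false_iff, Ne, PySem.Set.contains_iff, h2]; omega
        have how : w ∈ once := (h1 w).2 ho
        have hcontains : PySem.Set.contains once w = true := (PySem.Set.contains_iff once w).2 how
        have hc : (PySem.List.count p w == 1) = true := by simp [PySem.List.count, ho]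
        rw [hmw, hcontains, hc]
        simp only [Bool.not_false, if_true, PySem.Set.remove?_of_mem how]
        have hA : ∀ v, v ∈ PySem.Set.discard once w ↔ (p ++ [w]).count v = 1 := by
          intro v
          rw [PySem.Set.mem_discard, h1 v, count_append_single]
          by_cases hv : w = v
          · subst hv; simp only [eq_self_iff_true, ne_eq, not_true_eq_false, and_false, or_true, if_true, reduceIte, true_iff, false_iff]; omega
          · simp [hv, Ne.symm hv]
        have hB : ∀ v, v ∈ PySem.Set.add more w ↔ 2 ≤ (p ++ [w]).count v := by
          intro v
          rw [PySem.Set.mem_add, h2 v, count_append_single]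
          by_cases hv : w = v
          · subst hv; simp only [eq_self_iff_true, ne_eq, not_true_eq_false, and_false, or_true, if_true, reduceIte, true_iff, false_iff]; omega
          · simp [hv, Ne.symm hv]
        have := ih (p ++ [w]) (PySem.Set.discard once w) (PySem.Set.add more w) hA hB
        rw [happ, hlen] at this
        exact this
      · -- first occurrence: A records w in once, B's condition is false
        have h0 : p.count w = 0 := by omega
        have hmw : PySem.Set.contains more w = false := by
          rw [Bool.eq_false_iff, Ne, PySem.Set.contains_iff, h2]; omega
        have hcontains : PySem.Set.contains once w = false := by
          rw [Bool.eq_false_iff, Ne, PySem.Set.contains_iff, h1]; omega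
        have hc : (PySem.List.count p w == 1) = false := by
          simp only [PySem.List.count, beq_eq_false_iff_ne]; omega
        rw [hmw, hcontains, hc]
        simp only [Bool.not_false, if_true, Bool.false_eq_true, if_false]
        have hA : ∀ v, v ∈ PySem.Set.add once w ↔ (p ++ [w]).count v = 1 := by
          intro v
          rw [PySem.Set.mem_add, h1 v, count_append_single]
          by_cases hv : w = v
          · subst hv; simp only [eq_self_iff_true, ne_eq, not_true_eq_false, and_false, or_true, if_true, reduceIte, true_iff, false_iff]; omega
          · simp [hv, Ne.symm hv]
        have hB : ∀ v, v ∈ more ↔ 2 ≤ (p ++ [w]).count v := by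
          intro v
          rw [h2 v, count_append_single]
          by_cases hv : w = v
          · subst hv; simp only [eq_self_iff_true, ne_eq, not_true_eq_false, and_false, or_true, if_true, reduceIte, true_iff, false_iff]; omega
          · simp [hv, Ne.symm hv]
        have := ih (p ++ [w]) (PySem.Set.add once w) more hA hB
        rw [happ, hlen] at this
        exact this

-- ===== VERDICT (by name: the statement is the Claim_ definition above) =====
theorem remove_singles_spec : Claim_equal_remove_singles := by
  intro l _
  unfold Spec_remove_singles remove_singles remove_singles_alt
  have := removeSingles_key l [] PySem.Set.empty PySem.Set.empty
    (by intro v; simp [PySem.Set.empty]) (by intro v; simp [PySem.Set.empty])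
  simpa using this
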